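-- pv_equiv track=rewrite | github.com/TRUSTLab/DSN2015-Predictive-Modeling | src/dataAnalysis.py | findSystemDeltas
-- ===== SOURCE A (Python) =====
-- def findSystemDeltas(userDeltaDict, lengthoftime):
-- 	keylist = userDeltaDict.keys()
--
-- 	systemsChange = []
--
-- 	# initially create an empty systems list, all elements 0
-- 	for t in range(lengthoftime):
-- 		systemsChange.append(0)
--
-- 	currListofDelta = []
--
-- 	for x in keylist: # take current user ID key
-- 		currListofDelta = userDeltaDict[x][:] # copy the values
--
-- 		for t in range(lengthoftime):
-- 			systemsChange[t] += currListofDelta[t]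
--
-- 	return systemsChange
-- ===== SOURCE B (Python) =====
-- def findSystemDeltas(userDeltaDict, lengthoftime):
-- 	# divide and conquer: recursively merge halves of the user list by
-- 	# elementwise addition; no accumulator, no linear user-by-user pass
-- 	values = list(userDeltaDict.values())
--
-- 	def merged(lo, hi):
-- 		# elementwise sum of values[lo:hi], truncated to lengthoftime slots
-- 		if lo == hi:
-- 			return [0 for _ in range(lengthoftime)]
-- 		if hi - lo == 1:
-- 			v = values[lo]
-- 			return [v[t] for t in range(lengthoftime)]
-- 		mid = (lo + hi) // 2
-- 		return [a + b for a, b in zip(merged(lo, mid), merged(mid, hi))]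
--
-- 	return merged(0, len(values))
-- ===== Notes on version B (the rewrite author's own statement) =====
-- stated objective: alternative
-- what changed: Replaces A's linear user-by-user pass that mutates a zero-initialized accumulator with a divide-and-conquer recursion that splits the user list in halves and merges the two halves' results by elementwise addition (zip), maintaining no accumulator.
import Mathlib
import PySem

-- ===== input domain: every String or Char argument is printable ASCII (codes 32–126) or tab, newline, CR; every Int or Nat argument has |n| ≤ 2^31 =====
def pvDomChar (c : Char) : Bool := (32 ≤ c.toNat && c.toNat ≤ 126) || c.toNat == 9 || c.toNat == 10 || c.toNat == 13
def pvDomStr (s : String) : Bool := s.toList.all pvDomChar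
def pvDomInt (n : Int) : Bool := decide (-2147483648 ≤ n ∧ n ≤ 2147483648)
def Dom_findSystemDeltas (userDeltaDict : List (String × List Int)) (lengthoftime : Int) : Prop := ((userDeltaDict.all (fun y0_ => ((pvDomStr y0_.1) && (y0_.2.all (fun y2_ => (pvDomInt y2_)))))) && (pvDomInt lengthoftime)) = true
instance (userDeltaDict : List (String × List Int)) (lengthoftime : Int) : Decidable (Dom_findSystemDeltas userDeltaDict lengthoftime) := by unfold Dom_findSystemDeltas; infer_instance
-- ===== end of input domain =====

-- B replaces A's linear accumulator pass with a divide-and-conquer elementwise merge of halves; same cost (objective: alternative). Pre_ excludes the inputs where Python A raises IndexError (a per-user list shorter than lengthoftime).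


-- ===== PORT A =====
def findSystemDeltas (userDeltaDict : List (String × List Int)) (lengthoftime : Int) : List Int :=
  let d := PySem.Dict.ofList userDeltaDict
  let keylist := PySem.Dict.keys d
  let systemsChange :=
    (PySem.List.pyRange 0 lengthoftime 1).foldl (fun acc _ => acc ++ [(0 : Int)]) []
  keylist.foldl (fun systemsChange x =>
    let currListofDelta := PySem.List.slice (PySem.Dict.getD d x []) none none
    (PySem.List.pyRange 0 lengthoftime 1).foldl
      (fun sc t =>
        PySem.List.pySetD sc t (PySem.List.pyGetD sc t 0 + PySem.List.pyGetD currListofDelta t 0))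
      systemsChange) systemsChange

-- ===== PORT B =====
-- Source B's merged(lo, hi): elementwise sum of values[lo:hi] (here the sublist itself,
-- split at length/2 which equals Source B's (lo+hi)//2 midpoint), truncated to lengthoftime slots
def pvMerged (n : Int) (vs : List (List Int)) : List Int :=
  match vs with
  | [] => (PySem.List.pyRange 0 n 1).map (fun _ => (0 : Int))
  | [v] => (PySem.List.pyRange 0 n 1).map (fun t => PySem.List.pyGetD v t 0)
  | v1 :: v2 :: rest =>
    let mid := (v1 :: v2 :: rest).length / 2
    List.zipWith (· + ·) (pvMerged n ((v1 :: v2 :: rest).take mid))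
      (pvMerged n ((v1 :: v2 :: rest).drop mid))
termination_by vs.length
decreasing_by
  · simp; omega
  · simp; omega

def findSystemDeltas_alt (userDeltaDict : List (String × List Int)) (lengthoftime : Int) : List Int :=
  pvMerged lengthoftime (PySem.Dict.values (PySem.Dict.ofList userDeltaDict))

-- ===== PRECONDITION & SPEC =====
-- Pre_ excludes exactly the inputs where Python raises IndexError: some stored per-user list is shorter than lengthoftime (B raises there too).
def Pre_findSystemDeltas (userDeltaDict : List (String × List Int)) (lengthoftime : Int) : Prop :=
  ∀ p ∈ (PySem.Dict.ofList userDeltaDict).items, lengthoftime ≤ (p.2.length : Int)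
instance (userDeltaDict : List (String × List Int)) (lengthoftime : Int) : Decidable (Pre_findSystemDeltas userDeltaDict lengthoftime) := by unfold Pre_findSystemDeltas; infer_instance

def pvWitness_findSystemDeltas : (List (String × List Int)) × Int := ([("a", [1, 2]), ("b", [3, 4])], 2)

def Spec_findSystemDeltas (userDeltaDict : List (String × List Int)) (lengthoftime : Int) (out : List Int) : Prop := out = findSystemDeltas_alt userDeltaDict lengthoftime
instance (userDeltaDict : List (String × List Int)) (lengthoftime : Int) (out : List Int) : Decidable (Spec_findSystemDeltas userDeltaDict lengthoftime out) := by unfold Spec_findSystemDeltas; infer_instance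

-- ===== CLAIM (what is proved, stated in full; the proofs are below) =====
def Claim_equal_findSystemDeltas : Prop := ∀ (userDeltaDict : List (String × List Int)) (lengthoftime : Int), Dom_findSystemDeltas userDeltaDict lengthoftime → Pre_findSystemDeltas userDeltaDict lengthoftime → Spec_findSystemDeltas userDeltaDict lengthoftime (findSystemDeltas userDeltaDict lengthoftime)

-- ===== LEMMAS AND PROOFS =====

-- A's inner time loop, in Nat-range form: pointwise add of curr onto the first m slots.
theorem pv_inner_eq (curr : List Int) : ∀ (m : Nat) (sc : List Int), m ≤ sc.length →
    (List.range m).foldl (fun sc k => sc.set k (sc.getD k 0 + curr.getD k 0)) sc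
      = (List.range m).map (fun k => sc.getD k 0 + curr.getD k 0) ++ sc.drop m := by
  intro m
  induction m with
  | zero => intro sc _; simp
  | succ m ih =>
    intro sc hm
    have hmlt : m < sc.length := by omega
    rw [List.range_succ, List.foldl_append, List.map_append, ih sc (by omega)]
    simp only [List.foldl_cons, List.foldl_nil, List.map_cons, List.map_nil]
    have hLlen : ((List.range m).map (fun k => sc.getD k 0 + curr.getD k 0)).length = m := by simp
    have hdrop : sc.drop m = sc[m] :: sc.drop (m + 1) := (List.drop_eq_getElem_cons hmlt)
    have hgetD : sc.getD m 0 = sc[m] := by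
      simp [List.getD, List.getElem?_eq_getElem hmlt]
    rw [hdrop]
    have hget2 : ((List.range m).map (fun k => sc.getD k 0 + curr.getD k 0)
        ++ sc[m] :: sc.drop (m + 1)).getD m 0 = sc[m] := by
      rw [List.getD_eq_getElem?_getD, List.getElem?_append_right (by omega), hLlen]
      simp [List.getElem?_eq_getElem hmlt]
    rw [hget2, List.set_append_right m _ (by rw [hLlen]), hLlen]
    simp
    rw [hdrop, List.set_cons_zero, List.getElem?_eq_getElem hmlt]
    rfl

-- a list is the range-map of its own getD
theorem pv_self_eq_map_range (sc : List Int) :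
    (List.range sc.length).map (fun k => sc.getD k 0) = sc := by
  apply List.ext_getElem (by simp)
  intro i h1 h2
  simp [List.getD, List.getElem?_eq_getElem h2]

-- A's user loop over the list of per-user delta lists equals the per-slot sums.
theorem pv_outer_eq (m : Nat) : ∀ (vs : List (List Int)) (sc : List Int), sc.length = m →
    vs.foldl (fun sc curr =>
        (List.range m).foldl (fun sc k => sc.set k (sc.getD k 0 + curr.getD k 0)) sc) sc
      = (List.range m).map (fun k => vs.foldl (fun s v => s + v.getD k 0) (sc.getD k 0)) := by
  intro vs
  induction vs with
  | nil =>
    intro sc hlen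
    simpa [← hlen] using (pv_self_eq_map_range sc).symm
  | cons v vs ih =>
    intro sc hlen
    simp only [List.foldl_cons]
    rw [pv_inner_eq v m sc (by omega)]
    have hdrop : sc.drop m = [] := by rw [List.drop_eq_nil_iff]; omega
    rw [hdrop, List.append_nil]
    rw [ih _ (by simp)]
    apply List.map_congr_left
    intro k hk
    have hk' : k < m := List.mem_range.mp hk
    congr 1
    rw [List.getD_eq_getElem?_getD, List.getElem?_map]
    simp [List.getElem?_range hk']

-- the zero-initialization loop yields a constant-zero list
theorem pv_init_eq {α : Type} (l : List α) :
    l.foldl (fun acc (_ : α) => acc ++ [(0 : Int)]) [] = l.map (fun _ => (0 : Int)) := by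
  simp

-- iterating A's per-user body over the dict's keys is iterating it over its values
theorem pv_keys_fold (d : PySem.Dict String (List Int)) (m : Nat) (init : List Int)
    (hnd : d.keys.Nodup) :
    d.keys.foldl (fun sc x =>
        (List.range m).foldl (fun sc k => sc.set k (sc.getD k 0 + (d.getD x []).getD k 0)) sc) init
      = d.values.foldl (fun sc curr =>
          (List.range m).foldl (fun sc k => sc.set k (sc.getD k 0 + curr.getD k 0)) sc) init := by
  rw [PySem.Dict.values_eq_map_keys d hnd [], List.foldl_map]

-- zipping two maps over the same index list is a single map
theorem pv_zipWith_map_same {α β : Type} (f : β → β → β) (g h : α → β) (l : List α) :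
    List.zipWith f (l.map g) (l.map h) = l.map (fun x => f (g x) (h x)) := by
  induction l with
  | nil => rfl
  | cons a l ih => simp [ih]

-- B's divide-and-conquer merge computes the per-slot column sums
theorem pvMerged_eq (n : Int) (vs : List (List Int)) :
    pvMerged n vs
      = (List.range n.toNat).map (fun k => (vs.map (fun v => v.getD k 0)).sum) := by
  fun_induction pvMerged n vs with
  | case1 =>
    simp [PySem.List.pyRange_one, Function.comp_def, List.map_const']
  | case2 v =>
    simp [PySem.List.pyRange_one, List.map_map, Function.comp_def, PySem.List.pyGetD_natCast]
  | case3 v1 v2 rest mid ih1 ih2 =>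
    rw [ih1, ih2, pv_zipWith_map_same]
    apply List.map_congr_left
    intro k _
    rw [← List.sum_append, ← List.map_append, List.take_append_drop]

-- sum of a mapped list as the left fold A's characterization produces
theorem pv_sum_eq_foldl (k : Nat) (vs : List (List Int)) :
    (vs.map (fun v => v.getD k 0)).sum = vs.foldl (fun s v => s + v.getD k 0) 0 := by
  rw [List.sum_eq_foldl, List.foldl_map]

theorem findSystemDeltas_eq_alt (userDeltaDict : List (String × List Int)) (lengthoftime : Int) :
    findSystemDeltas userDeltaDict lengthoftime = findSystemDeltas_alt userDeltaDict lengthoftime := by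
  simp only [findSystemDeltas, findSystemDeltas_alt, PySem.List.slice_none_none,
    PySem.List.pyRange_one, sub_zero, List.foldl_map, 
    zero_add, PySem.List.pySetD_natCast, PySem.List.pyGetD_natCast, pv_init_eq]
  rw [pv_keys_fold (PySem.Dict.ofList userDeltaDict) lengthoftime.toNat _
    (PySem.Dict.nodup_keys_ofList userDeltaDict)]
  rw [pv_outer_eq lengthoftime.toNat (PySem.Dict.ofList userDeltaDict).values _ (by simp)]
  rw [pvMerged_eq]
  apply List.map_congr_left
  intro k hk
  have hk' : k < lengthoftime.toNat := List.mem_range.mp hk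
  rw [pv_sum_eq_foldl]
  congr 1
  rw [List.getD_eq_getElem?_getD, List.getElem?_map]
  simp [List.getElem?_range hk']

-- ===== VERDICT (by name: the statement is the Claim_ definition above) =====
theorem findSystemDeltas_spec : Claim_equal_findSystemDeltas := by
  intro u n _ _
  unfold Spec_findSystemDeltas
  exact findSystemDeltas_eq_alt u n
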